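-- pv_equiv track=rewrite | github.com/Devopsinitiate/eytgamingworld | doc_consolidation/generator.py | _group_files_by_type
-- ===== SOURCE A (Python) =====
-- from typing import Dict, List, Set, Tuple
--
-- def _group_files_by_type(files: List[Dict[str, str]]) -> Dict[str, List[Dict[str, str]]]:
--     """Group files by their type for better organization."""
--     grouped = {}
--
--     for file_info in files:
--         file_type = file_info.get('type', 'General Documentation')
--         if file_type not in grouped:
--             grouped[file_type] = []
--         grouped[file_type].append(file_info)
--
--     # Sort groups by priority
--     type_priority = {
--         'Setup Guides': 1,
--         'Feature Guides': 2,
--         'Consolidated Guides': 3,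
--         'API Documentation': 4,
--         'Test Reports': 5,
--         'Quick References': 6,
--         'Implementation Records': 7,
--         'General Documentation': 8,
--         'Historical Documents': 9
--     }
--
--     sorted_grouped = {}
--     for file_type in sorted(grouped.keys(), key=lambda x: type_priority.get(x, 10)):
--         sorted_grouped[file_type] = grouped[file_type]
--
--     return sorted_grouped
-- ===== SOURCE B (Python) =====
-- def _group_files_by_type(files):
--     """Group files by their type for better organization."""
--     grouped = {}
--     for file_info in files:
--         grouped.setdefault(file_info.get('type', 'General Documentation'), []).append(file_info)
--
--     ordered = {}
--     # known types in priority order; any other type (priority 10) follows in first-appearance order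
--     for t in ('Setup Guides', 'Feature Guides', 'Consolidated Guides',
--               'API Documentation', 'Test Reports', 'Quick References',
--               'Implementation Records', 'General Documentation', 'Historical Documents'):
--         if t in grouped:
--             ordered[t] = grouped[t]
--     for t, fs in grouped.items():
--         if t not in ordered:
--             ordered[t] = fs
--     return ordered
-- ===== Notes on version B (the rewrite author's own statement) =====
-- stated objective: alternative
-- what changed: Replaces the key-priority stable sort of the grouped keys by a fixed-template pass over the nine known types in priority order followed by an insertion-order sweep that appends the unknown (priority-10) types; grouping uses dict.setdefault instead of the membership-test-then-append idiom.
import Mathlib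
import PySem

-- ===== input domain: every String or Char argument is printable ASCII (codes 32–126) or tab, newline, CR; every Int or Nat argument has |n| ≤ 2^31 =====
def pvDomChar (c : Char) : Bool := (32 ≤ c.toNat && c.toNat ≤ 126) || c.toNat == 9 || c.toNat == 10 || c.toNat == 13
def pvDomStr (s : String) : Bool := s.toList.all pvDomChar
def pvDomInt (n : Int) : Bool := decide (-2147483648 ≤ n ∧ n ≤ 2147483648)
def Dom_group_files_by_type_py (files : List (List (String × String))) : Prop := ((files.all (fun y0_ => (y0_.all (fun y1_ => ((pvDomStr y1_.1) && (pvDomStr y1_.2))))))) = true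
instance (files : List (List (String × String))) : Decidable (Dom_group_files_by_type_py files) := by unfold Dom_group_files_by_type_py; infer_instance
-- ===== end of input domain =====

-- B replaces the stable priority sort of the grouped keys by a fixed pass over the nine known
-- types in priority order plus an insertion-order sweep for unknown types (objective: alternative).


-- ===== PORT A =====
-- file_info.get('type', 'General Documentation')  (shared transliteration of the same Python expression)
def pvFileType (fi : List (String × String)) : String :=
  PySem.Dict.getD (PySem.Dict.mk fi) "type" "General Documentation"

-- the type_priority dict literal
def pvTypePriority : PySem.Dict String Int :=
  PySem.Dict.mk [("Setup Guides", 1), ("Feature Guides", 2), ("Consolidated Guides", 3),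
                 ("API Documentation", 4), ("Test Reports", 5), ("Quick References", 6),
                 ("Implementation Records", 7), ("General Documentation", 8), ("Historical Documents", 9)]

def group_files_by_type_py (files : List (List (String × String))) : List (String × List (List (String × String))) :=
  let grouped := files.foldl (fun g fi =>
      let ft := pvFileType fi
      let g1 := if g.contains ft then g else g.insert ft []
      g1.modify ft [] (fun l => l ++ [fi])) PySem.Dict.empty
  let sortedKeys := PySem.List.sorted grouped.keys (fun x => pvTypePriority.getD x 10) false
  (sortedKeys.foldl (fun sg k => sg.insert k (grouped.getD k [])) PySem.Dict.empty).items

-- ===== PORT B =====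
-- the fixed tuple of known types, in priority order
def pvKnownTypes : List String :=
  ["Setup Guides", "Feature Guides", "Consolidated Guides", "API Documentation", "Test Reports",
   "Quick References", "Implementation Records", "General Documentation", "Historical Documents"]

def group_files_by_type_py_alt (files : List (List (String × String))) : List (String × List (List (String × String))) :=
  let grouped := files.foldl (fun g fi =>
      g.modify (pvFileType fi) [] (fun l => l ++ [fi])) PySem.Dict.empty
  let o1 := pvKnownTypes.foldl (fun o t =>
      if grouped.contains t then o.insert t (grouped.getD t []) else o) PySem.Dict.empty
  let o2 := grouped.items.foldl (fun o p =>
      if o.contains p.1 then o else o.insert p.1 p.2) o1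
  o2.items

-- ===== PRECONDITION & SPEC =====
def Spec_group_files_by_type_py (files : List (List (String × String))) (out : List (String × List (List (String × String)))) : Prop := out = group_files_by_type_py_alt files
instance (files : List (List (String × String))) (out : List (String × List (List (String × String)))) : Decidable (Spec_group_files_by_type_py files out) := by unfold Spec_group_files_by_type_py; infer_instance

-- ===== CLAIM (what is proved, stated in full; the proofs are below) =====
def Claim_equal_group_files_by_type_py : Prop := ∀ (files : List (List (String × String))), Dom_group_files_by_type_py files → Spec_group_files_by_type_py files (group_files_by_type_py files)


-- ===== LEMMAS AND PROOFS =====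

-- Dict basics specialised to the shapes the two ports build

theorem pv_contains_eq {ν : Type} (d : PySem.Dict String ν) (k : String) :
    d.contains k = decide (k ∈ d.keys) := by
  obtain ⟨l⟩ := d
  show (l.any fun p => p.1 == k) = decide (k ∈ l.map (fun x => x.1))
  induction l with
  | nil => simp
  | cons p t ih =>
    by_cases hp : p.1 = k
    · simp [hp]
    · simp only [List.any_cons, List.map_cons, List.mem_cons, ih]
      simp [hp, Ne.symm hp]

theorem pv_get?_none {ν : Type} (d : PySem.Dict String ν) (k : String)
    (h : d.contains k = false) : d.get? k = none := by
  have h' : ∀ p ∈ d.items, ¬ p.1 = k := by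
    simpa [PySem.Dict.contains, List.any_eq_false] using h
  have hf : List.find? (fun p => p.1 == k) d.items = none :=
    List.find?_eq_none.mpr (fun x hx => by simpa using h' x hx)
  simp [PySem.Dict.get?, hf]

theorem pv_items_insert_new {ν : Type} (d : PySem.Dict String ν) (k : String) (v : ν)
    (h : d.contains k = false) : (d.insert k v).items = d.items ++ [(k, v)] := by
  simp [PySem.Dict.insert, h]

theorem pv_modify_new {ν : Type} (d : PySem.Dict String ν) (k : String) (dflt : ν) (f : ν → ν)
    (h : d.contains k = false) : d.modify k dflt f = d.insert k (f dflt) := by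
  simp [PySem.Dict.modify, PySem.Dict.getD, pv_get?_none d k h]

theorem pv_keys_insert {ν : Type} (d : PySem.Dict String ν) (k : String) (v : ν) :
    (d.insert k v).keys = if d.contains k then d.keys else d.keys ++ [k] := by
  by_cases h : d.contains k = true
  · rw [if_pos h]
    simp only [PySem.Dict.insert, if_pos h, PySem.Dict.keys, List.map_map]
    refine List.map_congr_left ?_
    intro p hp
    by_cases hpk : p.1 = k <;> simp [hpk]
  · simp only [Bool.not_eq_true] at h
    simp [PySem.Dict.insert, PySem.Dict.keys, h]

-- the two grouping steps coincide
theorem pv_step_eq (g : PySem.Dict String (List (List (String × String)))) (fi : List (String × String)) :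
    (if g.contains (pvFileType fi) then g else g.insert (pvFileType fi) []).modify (pvFileType fi) [] (fun l => l ++ [fi])
    = g.modify (pvFileType fi) [] (fun l => l ++ [fi]) := by
  set ft := pvFileType fi with hft
  by_cases h : g.contains ft = true
  · simp [h]
  · simp only [Bool.not_eq_true] at h
    rw [if_neg (by simp [h])]
    have hnot : ∀ p ∈ g.items, (p.1 == ft) = false := by
      simpa [PySem.Dict.contains, List.any_eq_false] using h
    have hi1 : (g.insert ft ([] : List (List (String × String)))).items = g.items ++ [(ft, [])] :=
      pv_items_insert_new g ft [] h
    have hc1 : (g.insert ft ([] : List (List (String × String)))).contains ft = true := by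
      simp [PySem.Dict.contains, hi1, List.any_append]
    have hfindg : List.find? (fun p => p.1 == ft) g.items = none :=
      List.find?_eq_none.mpr (fun x hx => by simp [hnot x hx])
    have hget : (g.insert ft ([] : List (List (String × String)))).getD ft [] = [] := by
      simp [PySem.Dict.getD, PySem.Dict.get?, hi1, List.find?_append, hfindg, List.find?]
    rw [pv_modify_new g ft [] _ h, PySem.Dict.modify, hget]
    apply PySem.Dict.ext
    rw [PySem.Dict.insert, if_pos hc1, pv_items_insert_new g ft ([] ++ [fi]) h, hi1]
    show List.map (fun p => if (p.1 == ft) = true then (ft, [] ++ [fi]) else p) (g.items ++ [(ft, [])]) = g.items ++ [(ft, [] ++ [fi])]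
    rw [List.map_append]
    congr 1
    · refine (List.map_congr_left ?_).trans (List.map_id _)
      intro p hp; simp [hnot p hp]
    · simp

-- the grouped dict has pairwise-distinct keys
theorem pv_grouped_keys_nodup (files : List (List (String × String))) :
    ∀ (d : PySem.Dict String (List (List (String × String)))), d.keys.Nodup →
    ((files.foldl (fun g fi => g.modify (pvFileType fi) [] (fun l => l ++ [fi])) d).keys).Nodup := by
  induction files with
  | nil => intro d hd; simpa using hd
  | cons fi rest ih =>
    intro d hd
    simp only [List.foldl_cons]
    apply ih
    rw [PySem.Dict.modify, pv_keys_insert]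
    split
    · exact hd
    · rename_i hc
      refine List.Nodup.append hd (by simp) ?_
      intro a ha hb
      simp only [List.mem_singleton] at hb; subst hb
      rw [pv_contains_eq] at hc
      simp only [decide_eq_true_eq] at hc
      exact hc ha

-- fold inserting fresh keys = append of the mapped keys
theorem pv_foldl_insert_items {ν : Type} (v : String → ν) :
    ∀ (ks : List String) (d : PySem.Dict String ν), ks.Nodup →
    (∀ k ∈ ks, d.contains k = false) →
    (ks.foldl (fun sg k => sg.insert k (v k)) d).items = d.items ++ ks.map (fun k => (k, v k)) := by
  intro ks
  induction ks with
  | nil => intro d _ _; simp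
  | cons k rest ih =>
    intro d hnd hfresh
    rw [List.nodup_cons] at hnd
    obtain ⟨hk0, hnd'⟩ := hnd
    simp only [List.foldl_cons]
    have hk : d.contains k = false := hfresh k (by simp)
    have hrest : ∀ k' ∈ rest, (d.insert k (v k)).contains k' = false := by
      intro k' hk'
      have hne : ¬ (k = k') := fun e => hk0 (e ▸ hk')
      have hd' : ∀ p ∈ d.items, ¬ p.1 = k' := by
        simpa [PySem.Dict.contains, List.any_eq_false] using hfresh k' (by simp [hk'])
      simp only [PySem.Dict.contains, pv_items_insert_new d k (v k) hk, List.any_append,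
                 List.any_eq_false, Bool.or_eq_false_iff]
      exact ⟨by intro p hp; simp [hd' p hp], by simp [hne]⟩
    rw [ih _ hnd' hrest, pv_items_insert_new d k (v k) hk]
    simp

-- B's first fold: the known types present in grouped, in priority order
theorem pv_foldl_known_items (g : PySem.Dict String (List (List (String × String)))) :
    ∀ (ks : List String) (d : PySem.Dict String (List (List (String × String)))), ks.Nodup →
    (∀ k ∈ ks, d.contains k = false) →
    (ks.foldl (fun o t => if g.contains t then o.insert t (g.getD t []) else o) d).items
      = d.items ++ (ks.filter (fun t => g.contains t)).map (fun t => (t, g.getD t [])) := by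
  intro ks
  induction ks with
  | nil => intro d _ _; simp
  | cons k rest ih =>
    intro d hnd hfresh
    rw [List.nodup_cons] at hnd
    obtain ⟨hk0, hnd'⟩ := hnd
    simp only [List.foldl_cons]
    by_cases hg : g.contains k = true
    · have hk : d.contains k = false := hfresh k (by simp)
      have hrest : ∀ k' ∈ rest, (d.insert k (g.getD k [])).contains k' = false := by
        intro k' hk'
        have hne : ¬ (k = k') := fun e => hk0 (e ▸ hk')
        have hd' : ∀ p ∈ d.items, ¬ p.1 = k' := by
          simpa [PySem.Dict.contains, List.any_eq_false] using hfresh k' (by simp [hk'])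
        simp only [PySem.Dict.contains, pv_items_insert_new d k _ hk, List.any_append,
                   List.any_eq_false, Bool.or_eq_false_iff]
        exact ⟨by intro p hp; simp [hd' p hp], by simp [hne]⟩
      rw [if_pos hg, ih _ hnd' hrest, pv_items_insert_new d k _ hk]
      simp [hg]
    · simp only [Bool.not_eq_true] at hg
      rw [if_neg (by simp [hg]), ih _ hnd' (fun k' hk' => hfresh k' (by simp [hk']))]
      simp [hg]

-- B's second fold: appends exactly the items whose key is not already present
theorem pv_foldl_new_items {ν : Type} :
    ∀ (ps : List (String × ν)) (d : PySem.Dict String ν), (ps.map Prod.fst).Nodup →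
    (ps.foldl (fun o p => if o.contains p.1 then o else o.insert p.1 p.2) d).items
      = d.items ++ ps.filter (fun p => !(d.contains p.1)) := by
  intro ps
  induction ps with
  | nil => intro d _; simp
  | cons p rest ih =>
    intro d hnd
    rw [List.map_cons, List.nodup_cons] at hnd
    obtain ⟨hp1, hnd'⟩ := hnd
    simp only [List.foldl_cons]
    by_cases h : d.contains p.1 = true
    · rw [if_pos h, ih _ hnd']
      simp [List.filter_cons, h]
    · simp only [Bool.not_eq_true] at h
      rw [if_neg (by simp [h]), ih _ hnd']
      have hitems : (d.insert p.1 p.2).items = d.items ++ [p] := by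
        rw [pv_items_insert_new d p.1 p.2 h]
      have hfc : rest.filter (fun q => !((d.insert p.1 p.2).contains q.1))
          = rest.filter (fun q => !(d.contains q.1)) := by
        refine List.filter_congr ?_
        intro q hq
        have hne : ¬ (p.1 = q.1) := fun e => hp1 (e ▸ List.mem_map_of_mem hq)
        simp [PySem.Dict.contains, hitems, List.any_append, hne]
      rw [hfc, hitems]
      simp [h]

-- items filtered on a key predicate, for a dict with distinct keys
theorem pv_items_filter_key {ν : Type} (dflt : ν) (pk : String → Bool) :
    ∀ (l : List (String × ν)), (l.map Prod.fst).Nodup →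
    l.filter (fun p => pk p.1)
      = ((l.map Prod.fst).filter pk).map
          (fun k => (k, (((l.find? (fun p => p.1 == k)).map (fun p => p.2)).getD dflt))) := by
  intro l
  induction l with
  | nil => intro _; simp
  | cons p t ih =>
    intro hnd
    rw [List.map_cons, List.nodup_cons] at hnd
    obtain ⟨hp1, hnd'⟩ := hnd
    have hmap : ∀ k ∈ (t.map Prod.fst).filter pk,
        (k, ((List.find? (fun q => q.1 == k) (p :: t)).map (fun q => q.2)).getD dflt)
        = (k, ((List.find? (fun q => q.1 == k) t).map (fun q => q.2)).getD dflt) := by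
      intro k hk
      have hkt : k ∈ t.map Prod.fst := (List.mem_filter.mp hk).1
      have hne : ¬ (p.1 = k) := fun e => hp1 (e ▸ hkt)
      rw [List.find?_cons_of_neg (by simp [hne])]
    by_cases hpk : pk p.1 = true
    · rw [List.filter_cons_of_pos (by simpa using hpk), List.map_cons,
          List.filter_cons_of_pos (by simpa using hpk), List.map_cons]
      rw [List.find?_cons_of_pos (by simp)]
      congr 1
      rw [ih hnd']
      exact (List.map_congr_left hmap).symm
    · rw [List.filter_cons_of_neg (by simpa using hpk), List.map_cons,
          List.filter_cons_of_neg (by simpa using hpk)]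
      rw [ih hnd']
      exact (List.map_congr_left hmap).symm

-- priority of an unknown type is 10
theorem pv_prio_unknown (x : String) (h : x ∉ pvKnownTypes) : pvTypePriority.getD x 10 = 10 := by
  simp only [pvKnownTypes, List.mem_cons, List.not_mem_nil, or_false, not_or] at h
  obtain ⟨h1, h2, h3, h4, h5, h6, h7, h8, h9⟩ := h
  have b1 : ("Setup Guides" == x) = false := beq_eq_false_iff_ne.mpr (Ne.symm h1)
  have b2 : ("Feature Guides" == x) = false := beq_eq_false_iff_ne.mpr (Ne.symm h2)
  have b3 : ("Consolidated Guides" == x) = false := beq_eq_false_iff_ne.mpr (Ne.symm h3)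
  have b4 : ("API Documentation" == x) = false := beq_eq_false_iff_ne.mpr (Ne.symm h4)
  have b5 : ("Test Reports" == x) = false := beq_eq_false_iff_ne.mpr (Ne.symm h5)
  have b6 : ("Quick References" == x) = false := beq_eq_false_iff_ne.mpr (Ne.symm h6)
  have b7 : ("Implementation Records" == x) = false := beq_eq_false_iff_ne.mpr (Ne.symm h7)
  have b8 : ("General Documentation" == x) = false := beq_eq_false_iff_ne.mpr (Ne.symm h8)
  have b9 : ("Historical Documents" == x) = false := beq_eq_false_iff_ne.mpr (Ne.symm h9)
  simp [pvTypePriority, PySem.Dict.getD, PySem.Dict.get?, List.find?,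
        b1, b2, b3, b4, b5, b6, b7, b8, b9]

theorem pv_prio_le_ten (x : String) : pvTypePriority.getD x 10 ≤ 10 := by
  by_cases h : x ∈ pvKnownTypes
  · simp only [pvKnownTypes, List.mem_cons, List.not_mem_nil, or_false] at h
    rcases h with rfl | rfl | rfl | rfl | rfl | rfl | rfl | rfl | rfl <;> decide
  · simp [pv_prio_unknown x h]

-- inserting into a list split at the insertion point
theorem pv_insertBy_middle {α : Type} (before : α → α → Bool) (x : α) :
    ∀ (l1 l2 : List α), (∀ y ∈ l1, before x y = false) → (∀ y ∈ l2, before x y = true) →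
    PySem.List.insertBy before x (l1 ++ l2) = l1 ++ x :: l2 := by
  intro l1
  induction l1 with
  | nil =>
    intro l2 _ h2
    cases l2 with
    | nil => rfl
    | cons y t => simp [PySem.List.insertBy, h2 y (by simp)]
  | cons y t ih =>
    intro l2 h1 h2
    have hy : before x y = false := h1 y (by simp)
    simp only [List.cons_append, PySem.List.insertBy, hy]
    simp [ih l2 (fun z hz => h1 z (by simp [hz])) h2]

-- insertion of a known type into the characterised sorted list
theorem pv_insert_known (k1 k2 : List String) (x : String) (xs : List String)
    (hk : pvKnownTypes = k1 ++ x :: k2)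
    (h1 : ∀ y ∈ k1, pvTypePriority.getD y 10 < pvTypePriority.getD x 10)
    (h2 : ∀ y ∈ k2, pvTypePriority.getD x 10 < pvTypePriority.getD y 10)
    (hlt : pvTypePriority.getD x 10 < 10)
    (hx : x ∉ xs) :
    PySem.List.insertBy (fun a b => decide (pvTypePriority.getD a 10 < pvTypePriority.getD b 10)) x
      (pvKnownTypes.filter (fun t => decide (t ∈ xs)) ++ xs.filter (fun t => decide (t ∉ pvKnownTypes)))
    = pvKnownTypes.filter (fun t => decide (t ∈ xs ++ [x])) ++ (xs ++ [x]).filter (fun t => decide (t ∉ pvKnownTypes)) := by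
  have hxK : x ∈ pvKnownTypes := by rw [hk]; simp
  have hne1 : ∀ y ∈ k1, ¬ y = x := fun y hy e => absurd (h1 y hy) (by rw [e]; exact lt_irrefl _)
  have hne2 : ∀ y ∈ k2, ¬ y = x := fun y hy e => absurd (h2 y hy) (by rw [e]; exact lt_irrefl _)
  have e1 : pvKnownTypes.filter (fun t => decide (t ∈ xs))
      = k1.filter (fun t => decide (t ∈ xs)) ++ k2.filter (fun t => decide (t ∈ xs)) := by
    rw [hk, List.filter_append, List.filter_cons]
    simp [hx]
  have e2 : pvKnownTypes.filter (fun t => decide (t ∈ xs ++ [x]))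
      = k1.filter (fun t => decide (t ∈ xs)) ++ x :: k2.filter (fun t => decide (t ∈ xs)) := by
    rw [hk, List.filter_append, List.filter_cons]
    simp only [List.mem_append, List.mem_singleton, or_true, decide_true, if_pos]
    congr 1
    · exact List.filter_congr (fun y hy => by simp [hne1 y hy])
    · congr 1
      exact List.filter_congr (fun y hy => by simp [hne2 y hy])
  have e3 : (xs ++ [x]).filter (fun t => decide (t ∉ pvKnownTypes))
      = xs.filter (fun t => decide (t ∉ pvKnownTypes)) := by
    rw [List.filter_append]
    simp [hxK]
  rw [e1, e2, e3, List.append_assoc]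
  rw [pv_insertBy_middle _ x (k1.filter (fun t => decide (t ∈ xs)))
        (k2.filter (fun t => decide (t ∈ xs)) ++ xs.filter (fun t => decide (t ∉ pvKnownTypes)))
        ?_ ?_]
  · simp [List.append_assoc]
  · intro y hy
    have hyk := (List.mem_filter.mp hy).1
    exact decide_eq_false (not_lt.mpr (h1 y hyk).le)
  · intro y hy
    rcases List.mem_append.mp hy with hy2 | hyu
    · exact decide_eq_true (h2 y (List.mem_filter.mp hy2).1)
    · have : y ∉ pvKnownTypes := by
        have := (List.mem_filter.mp hyu).2
        simpa using this
      exact decide_eq_true (by rw [pv_prio_unknown y this]; exact hlt)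

-- the sort characterised: known types present (priority order) then unknown types (input order)
theorem pv_sorted_known : ∀ (xs : List String), xs.Nodup →
    PySem.List.sorted xs (fun x => pvTypePriority.getD x 10) false
    = pvKnownTypes.filter (fun t => decide (t ∈ xs)) ++ xs.filter (fun t => decide (t ∉ pvKnownTypes)) := by
  intro xs
  induction xs using List.reverseRecOn with
  | nil => intro _; rfl
  | append_singleton xs x ih =>
    intro h
    rw [List.nodup_append] at h
    obtain ⟨hxs, -, hdisj⟩ := h
    have hx : x ∉ xs := fun hmem => hdisj x hmem x (by simp) rfl
    rw [PySem.List.sorted_eq_foldl_insertBy, List.foldl_append, List.foldl_cons, List.foldl_nil,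
        ← PySem.List.sorted_eq_foldl_insertBy, ih hxs]
    by_cases hk : x ∈ pvKnownTypes
    · have hk' := hk
      simp only [pvKnownTypes, List.mem_cons, List.not_mem_nil, or_false] at hk'
      rcases hk' with rfl | rfl | rfl | rfl | rfl | rfl | rfl | rfl | rfl
      · exact pv_insert_known [] ["Feature Guides", "Consolidated Guides", "API Documentation", "Test Reports", "Quick References", "Implementation Records", "General Documentation", "Historical Documents"] _ xs rfl (by decide) (by decide) (by decide) hx
      · exact pv_insert_known ["Setup Guides"] ["Consolidated Guides", "API Documentation", "Test Reports", "Quick References", "Implementation Records", "General Documentation", "Historical Documents"] _ xs rfl (by decide) (by decide) (by decide) hx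
      · exact pv_insert_known ["Setup Guides", "Feature Guides"] ["API Documentation", "Test Reports", "Quick References", "Implementation Records", "General Documentation", "Historical Documents"] _ xs rfl (by decide) (by decide) (by decide) hx
      · exact pv_insert_known ["Setup Guides", "Feature Guides", "Consolidated Guides"] ["Test Reports", "Quick References", "Implementation Records", "General Documentation", "Historical Documents"] _ xs rfl (by decide) (by decide) (by decide) hx
      · exact pv_insert_known ["Setup Guides", "Feature Guides", "Consolidated Guides", "API Documentation"] ["Quick References", "Implementation Records", "General Documentation", "Historical Documents"] _ xs rfl (by decide) (by decide) (by decide) hx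
      · exact pv_insert_known ["Setup Guides", "Feature Guides", "Consolidated Guides", "API Documentation", "Test Reports"] ["Implementation Records", "General Documentation", "Historical Documents"] _ xs rfl (by decide) (by decide) (by decide) hx
      · exact pv_insert_known ["Setup Guides", "Feature Guides", "Consolidated Guides", "API Documentation", "Test Reports", "Quick References"] ["General Documentation", "Historical Documents"] _ xs rfl (by decide) (by decide) (by decide) hx
      · exact pv_insert_known ["Setup Guides", "Feature Guides", "Consolidated Guides", "API Documentation", "Test Reports", "Quick References", "Implementation Records"] ["Historical Documents"] _ xs rfl (by decide) (by decide) (by decide) hx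
      · exact pv_insert_known ["Setup Guides", "Feature Guides", "Consolidated Guides", "API Documentation", "Test Reports", "Quick References", "Implementation Records", "General Documentation"] [] _ xs rfl (by decide) (by decide) (by decide) hx
    · rw [PySem.List.insertBy_of_forall_not_before _ _ _ ?_]
      · have e2 : pvKnownTypes.filter (fun t => decide (t ∈ xs ++ [x]))
            = pvKnownTypes.filter (fun t => decide (t ∈ xs)) :=
          List.filter_congr (fun y hy => by
            have hne : ¬ y = x := fun e => hk (e ▸ hy)
            simp [List.mem_append, hne])
        rw [e2, List.filter_append]
        simp [hk, List.append_assoc]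
      · intro y hy
        refine decide_eq_false ?_
        rw [pv_prio_unknown x hk]
        exact not_lt.mpr (pv_prio_le_ten y)

-- assembling the two ports
theorem pv_main (files : List (List (String × String))) :
    group_files_by_type_py files = group_files_by_type_py_alt files := by
  unfold group_files_by_type_py group_files_by_type_py_alt
  -- the two grouping folds build the same dict
  have hstep : (fun (g : PySem.Dict String (List (List (String × String)))) fi =>
      (if g.contains (pvFileType fi) then g else g.insert (pvFileType fi) []).modify (pvFileType fi) [] (fun l => l ++ [fi]))
      = (fun (g : PySem.Dict String (List (List (String × String)))) fi =>
      g.modify (pvFileType fi) [] (fun l => l ++ [fi])) := by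
    funext g fi; exact pv_step_eq g fi
  simp only [hstep]
  set g := files.foldl (fun g fi => g.modify (pvFileType fi) [] (fun l => l ++ [fi])) PySem.Dict.empty with hg
  have hnodup : g.keys.Nodup := pv_grouped_keys_nodup files PySem.Dict.empty (by simp [PySem.Dict.empty, PySem.Dict.keys])
  have hnodup' : (g.items.map Prod.fst).Nodup := hnodup
  have hknodup : pvKnownTypes.Nodup := by decide
  have hsnodup : (PySem.List.sorted g.keys (fun x => pvTypePriority.getD x 10) false).Nodup :=
    ((PySem.List.sorted_perm g.keys (fun x => pvTypePriority.getD x 10) false).nodup_iff).mpr hnodup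
  -- A's side: the output dict built over the sorted keys
  rw [pv_foldl_insert_items (fun k => g.getD k []) _ PySem.Dict.empty hsnodup (fun _ _ => rfl),
      pv_sorted_known g.keys hnodup]
  -- B's side: the two folds
  rw [pv_foldl_new_items g.items _ hnodup']
  set o1 := pvKnownTypes.foldl (fun o t => if g.contains t then o.insert t (g.getD t []) else o) PySem.Dict.empty with ho1
  have ho1items : o1.items = (pvKnownTypes.filter (fun t => g.contains t)).map (fun t => (t, g.getD t [])) := by
    rw [ho1, pv_foldl_known_items g pvKnownTypes PySem.Dict.empty hknodup (fun _ _ => rfl)]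
    rfl
  have hcont : ∀ p ∈ g.items, o1.contains p.1 = decide (p.1 ∈ pvKnownTypes) := by
    intro p hp
    have hpk : g.contains p.1 = true := by
      rw [pv_contains_eq]
      simp only [decide_eq_true_eq, PySem.Dict.keys, List.mem_map]
      exact ⟨p, hp, rfl⟩
    rw [pv_contains_eq]
    simp [PySem.Dict.keys, ho1items, List.map_map, List.mem_filter, Function.comp, hpk]
  have hfilter : g.items.filter (fun p => !(o1.contains p.1))
      = g.items.filter (fun p => decide (p.1 ∉ pvKnownTypes)) :=
    List.filter_congr (fun p hp => by rw [hcont p hp]; simp)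
  rw [hfilter, pv_items_filter_key ([] : List (List (String × String))) (fun t => decide (t ∉ pvKnownTypes)) g.items hnodup']
  have hgd : (fun k => (k, ((g.items.find? (fun p => p.1 == k)).map (fun p => p.2)).getD ([] : List (List (String × String)))))
      = (fun k => (k, g.getD k [])) := rfl
  have hkeys : g.items.map Prod.fst = g.keys := rfl
  rw [hgd, hkeys, ho1items]
  have hKc : pvKnownTypes.filter (fun t => g.contains t)
      = pvKnownTypes.filter (fun t => decide (t ∈ g.keys)) :=
    List.filter_congr (fun t _ => pv_contains_eq g t)
  rw [hKc]
  simp [List.map_append, PySem.Dict.empty]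

-- ===== VERDICT (by name: the statement is the Claim_ definition above) =====
theorem group_files_by_type_py_spec : Claim_equal_group_files_by_type_py := by
  intro files _
  exact pv_main files
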